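-- pv_equiv track=rewrite | github.com/joowhan/algorithm | 프로그래머스/3/132266. 부대복귀/부대복귀.py | solution
-- ===== SOURCE A (Python) =====
-- from collections import deque
--
-- def solution(n, roads, sources, destination):
--     answer = []
--     graph=[[] for _ in range(n+1)]
--
--     for road in roads:
--         graph[road[0]].append(road[1])
--         graph[road[1]].append(road[0])
--
--     visited = [-1]*(n+1)
--     visited[destination] =0
--     q = deque([destination])
--
--     while q:
--         x = q.popleft()
--         for i in graph[x]:
--             if visited[i]==-1:
--                 visited[i] =visited[x]+1
--                 q.append(i)
--     for source in sources:
--         answer.append(visited[source])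
-- #     for source in sources:
-- #         visited = [-1]*(n+1)
-- #         visited[source] =0
-- #         q = deque([source])
--
-- #         while q:
-- #             x = q.popleft()
-- #             for i in graph[x]:
-- #                 if visited[i]==-1:
-- #                     visited[i] =visited[x]+1
-- #                     q.append(i)
-- #         answer.append(visited[destination])
--     return answer
-- ===== SOURCE B (Python) =====
-- def solution(n, roads, sources, destination):
--     dist = [-1] * (n + 1)
--     dist[destination] = 0
--     for _ in range(n + 1):
--         changed = False
--         for road in roads:
--             a, b = road[0], road[1]
--             if dist[a] != -1 and (dist[b] == -1 or dist[a] + 1 < dist[b]):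
--                 dist[b] = dist[a] + 1
--                 changed = True
--             if dist[b] != -1 and (dist[a] == -1 or dist[b] + 1 < dist[a]):
--                 dist[a] = dist[b] + 1
--                 changed = True
--         if not changed:
--             break
--     return [dist[s] for s in sources]
-- ===== Notes on version B (the rewrite author's own statement) =====
-- stated objective: alternative
-- what changed: Replaces BFS (adjacency list + deque of nodes) with Bellman-Ford-style edge relaxation: no graph is built at all; repeated passes over the raw roads list relax both directions of every road until a pass changes nothing.
import Mathlib
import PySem

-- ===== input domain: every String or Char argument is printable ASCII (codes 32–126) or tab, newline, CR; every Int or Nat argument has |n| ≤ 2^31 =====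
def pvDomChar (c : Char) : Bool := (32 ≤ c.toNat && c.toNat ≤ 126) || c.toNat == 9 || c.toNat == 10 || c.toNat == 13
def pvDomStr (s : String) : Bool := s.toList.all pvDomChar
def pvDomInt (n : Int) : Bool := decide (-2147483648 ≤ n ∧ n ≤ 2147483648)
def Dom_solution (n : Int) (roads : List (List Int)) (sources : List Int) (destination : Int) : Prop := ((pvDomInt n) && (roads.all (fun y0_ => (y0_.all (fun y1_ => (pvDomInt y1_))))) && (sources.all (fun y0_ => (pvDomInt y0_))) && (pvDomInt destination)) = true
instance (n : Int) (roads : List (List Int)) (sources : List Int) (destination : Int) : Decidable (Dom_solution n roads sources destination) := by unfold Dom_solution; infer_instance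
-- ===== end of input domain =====

-- B replaces A's BFS (adjacency list + deque) by Bellman-Ford-style edge relaxation:
-- repeated passes over the raw roads list, relaxing both directions of every road,
-- until a pass changes nothing; objective: alternative algorithm, not faster.

-- ===== PORT A =====
-- the adjacency-list construction loop of A
def addRoad (g : List (List Int)) (road : List Int) : List (List Int) :=
  let a := PySem.List.pyGetD road 0 0
  let b := PySem.List.pyGetD road 1 0
  let g1 := PySem.List.pySetD g a (PySem.List.pyGetD g a [] ++ [b])
  PySem.List.pySetD g1 b (PySem.List.pyGetD g1 b [] ++ [a])

def buildGraph (n : Int) (roads : List (List Int)) : List (List Int) :=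
  roads.foldl addRoad (List.replicate (n+1).toNat [])

-- A's inner loop: for i in graph[x]: if visited[i]==-1: visited[i]=visited[x]+1; q.append(i)
def stepA (v : List Int) (x : Int) (q : List Int) : List Int → List Int × List Int
  | [] => (v, q)
  | i :: rest =>
    if PySem.List.pyGetD v i 0 = -1 then
      stepA (PySem.List.pySetD v i (PySem.List.pyGetD v x 0 + 1)) x (q ++ [i]) rest
    else stepA v x q rest

-- A's while loop over the deque (fuel n+1: each pop dequeues a node that was marked on enqueue)
def bfsA (g : List (List Int)) : Nat → List Int → List Int → List Int
  | 0, v, _ => v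
  | _+1, v, [] => v
  | f+1, v, x :: q =>
      let vq := stepA v x q (PySem.List.pyGetD g x [])
      bfsA g f vq.1 vq.2

def solution (n : Int) (roads : List (List Int)) (sources : List Int) (destination : Int) : List Int :=
  let g := buildGraph n roads
  let v0 := PySem.List.pySetD (List.replicate (n+1).toNat (-1 : Int)) destination 0
  let v := bfsA g (n+1).toNat v0 [destination]
  sources.map (fun s => PySem.List.pyGetD v s 0)

-- ===== PORT B =====
-- one relaxation of the directed edge a->b:
-- if dist[a] != -1 and (dist[b] == -1 or dist[a]+1 < dist[b]): dist[b] = dist[a]+1; changed = True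
def relax1 (v : List Int) (c : Bool) (a b : Int) : List Int × Bool :=
  if PySem.List.pyGetD v a 0 ≠ -1 ∧
      (PySem.List.pyGetD v b 0 = -1 ∨ PySem.List.pyGetD v a 0 + 1 < PySem.List.pyGetD v b 0) then
    (PySem.List.pySetD v b (PySem.List.pyGetD v a 0 + 1), true)
  else (v, c)

-- one road: a, b = road[0], road[1]; relax a->b then b->a
def relaxRoad (v : List Int) (c : Bool) (road : List Int) : List Int × Bool :=
  let a := PySem.List.pyGetD road 0 0
  let b := PySem.List.pyGetD road 1 0
  let p := relax1 v c a b
  relax1 p.1 p.2 b a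

-- one pass of the inner for-loop over roads, starting with changed = False
def bfPass (roads : List (List Int)) (v : List Int) : List Int × Bool :=
  roads.foldl (fun s road => relaxRoad s.1 s.2 road) (v, false)

-- for _ in range(n+1): ... if not changed: break
def bfLoop (roads : List (List Int)) : Nat → List Int → List Int
  | 0, v => v
  | f+1, v =>
    let p := bfPass roads v
    if p.2 then bfLoop roads f p.1 else p.1

def solution_alt (n : Int) (roads : List (List Int)) (sources : List Int) (destination : Int) : List Int :=
  let dist0 := PySem.List.pySetD (List.replicate (n+1).toNat (-1 : Int)) destination 0
  let dist := bfLoop roads (n+1).toNat dist0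
  sources.map (fun s => PySem.List.pyGetD dist s 0)

-- ===== PRECONDITION & SPEC =====
-- Pre_ is exactly the inputs on which the Python A returns normally (no IndexError):
-- n ≥ 0, every road row has ≥ 2 entries, and every node label (road endpoints, sources,
-- destination) lies in Python's index range -(n+1)..n (negative labels wrap around).
def Pre_solution (n : Int) (roads : List (List Int)) (sources : List Int) (destination : Int) : Prop :=
  0 ≤ n ∧ -(n+1) ≤ destination ∧ destination ≤ n ∧
  (∀ r ∈ roads, 2 ≤ r.length ∧ -(n+1) ≤ r.getD 0 0 ∧ r.getD 0 0 ≤ n ∧ -(n+1) ≤ r.getD 1 0 ∧ r.getD 1 0 ≤ n) ∧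
  (∀ s ∈ sources, -(n+1) ≤ s ∧ s ≤ n)
instance (n : Int) (roads : List (List Int)) (sources : List Int) (destination : Int) : Decidable (Pre_solution n roads sources destination) := by unfold Pre_solution; infer_instance

def pvWitness_solution : Int × List (List Int) × List Int × Int := (3, [[1, 2], [2, 3]], [1, 3, 0], 2)

def Spec_solution (n : Int) (roads : List (List Int)) (sources : List Int) (destination : Int) (out : List Int) : Prop := out = solution_alt n roads sources destination
instance (n : Int) (roads : List (List Int)) (sources : List Int) (destination : Int) (out : List Int) : Decidable (Spec_solution n roads sources destination out) := by unfold Spec_solution; infer_instance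

-- ===== CLAIM (what is proved, stated in full; the proofs are below) =====
def Claim_equal_solution : Prop := ∀ (n : Int) (roads : List (List Int)) (sources : List Int) (destination : Int), Dom_solution n roads sources destination → Pre_solution n roads sources destination → Spec_solution n roads sources destination (solution n roads sources destination)

-- ===== LEMMAS AND PROOFS =====

-- number of still-unvisited cells; miss v + queue length is the exact remaining step count
def miss (v : List Int) : Nat := v.count (-1)

-- Python's wrapped index (for -L ≤ i < L), and the in-range condition
def widx (L : Nat) (i : Int) : Nat := if 0 ≤ i then i.toNat else L - (-i).toNat

def InR (L : Nat) (i : Int) : Prop := -(L : Int) ≤ i ∧ i < (L : Int)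

theorem widx_lt (L : Nat) (i : Int) (h1 : InR L i) : widx L i < L := by
  obtain ⟨ha, hb⟩ := h1
  unfold widx
  split_ifs <;> omega

theorem pyIdx?_inr (L : Nat) (i : Int) (h : InR L i) : PySem.List.pyIdx? L i = some (widx L i) := by
  obtain ⟨ha, hb⟩ := h
  unfold PySem.List.pyIdx? widx
  split_ifs <;> rfl

theorem pyGetD_widx {α : Type} (v : List α) (i : Int) (d : α) (h : InR v.length i) :
    PySem.List.pyGetD v i d = v.getD (widx v.length i) d := by
  simp only [PySem.List.pyGetD, PySem.List.pyGet?, pyIdx?_inr v.length i h]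
  rw [List.getD_eq_getElem?_getD]
  rfl

theorem pySetD_widx {α : Type} (v : List α) (i : Int) (a : α) (h : InR v.length i) :
    PySem.List.pySetD v i a = v.set (widx v.length i) a := by
  simp only [PySem.List.pySetD, PySem.List.pySet?, pyIdx?_inr v.length i h, Option.map_some,
    Option.getD_some]

theorem getD_set_self {α : Type} (l : List α) (j : Nat) (a d : α) (h : j < l.length) :
    (l.set j a).getD j d = a := by
  rw [List.getD_eq_getElem _ _ (by simpa using h)]
  simp

theorem getD_set_ne {α : Type} (l : List α) (i j : Nat) (a d : α) (h : j ≠ i) :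
    (l.set i a).getD j d = l.getD j d := by
  rcases Nat.lt_or_ge j l.length with hj | hj
  · rw [List.getD_eq_getElem _ _ (by simpa using hj), List.getD_eq_getElem _ _ hj]
    rw [List.getElem_set_ne (by omega)]
  · rw [List.getD_eq_default _ _ (by simpa using hj), List.getD_eq_default _ _ hj]

theorem count_set_neg_one : ∀ (l : List Int) (j : Nat) (w : Int), j < l.length →
    l.getD j 0 = -1 → w ≠ -1 → (l.set j w).count (-1) + 1 = l.count (-1) := by
  intro l
  induction l with
  | nil => intro j w h; simp at h
  | cons hd tl ih =>
    intro j w hj hget hw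
    cases j with
    | zero =>
      simp only [List.getD_cons_zero] at hget
      subst hget
      simp [hw]
    | succ j =>
      simp only [List.getD_cons_succ] at hget
      have := ih j w (by simpa using hj) hget hw
      simp only [List.set_cons_succ, List.count_cons]
      omega

theorem mem_pyGetD_graph {g : List (List Int)} {P : Int → Prop}
    (hg : ∀ l ∈ g, ∀ i ∈ l, P i) (x : Int) :
    ∀ i ∈ PySem.List.pyGetD g x [], P i := by
  intro i hi
  cases h : PySem.List.pyGet? g x with
  | none =>
    simp only [PySem.List.pyGetD, h, Option.getD_none] at hi
    simp at hi
  | some l =>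
    simp only [PySem.List.pyGetD, h, Option.getD_some] at hi
    exact hg l (PySem.List.mem_of_pyGet?_eq_some _ h) i hi

-- ---- a reference level-synchronized BFS, used only inside the proofs ----

def stepB (v : List Int) (level : Int) (nxt : List Int) : List Int → List Int × List Int
  | [] => (v, nxt)
  | i :: rest =>
    if PySem.List.pyGetD v i 0 = -1 then
      stepB (PySem.List.pySetD v i (level + 1)) level (nxt ++ [i]) rest
    else stepB v level nxt rest

def levelStep (g : List (List Int)) (level : Int) (v : List Int) (front : List Int) : List Int × List Int :=
  front.foldl (fun vn x => stepB vn.1 level vn.2 (PySem.List.pyGetD g x [])) (v, [])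

def bfsB (g : List (List Int)) : Nat → Int → List Int → List Int → List Int
  | 0, _, v, _ => v
  | f+1, level, v, front =>
    if front.isEmpty then v
    else
      let vn := levelStep g level v front
      bfsB g f (level+1) vn.1 vn.2

-- stepB only appends to its accumulator
theorem stepB_acc : ∀ (nbrs : List Int) (v : List Int) (level : Int) (acc : List Int),
    stepB v level acc nbrs = ((stepB v level [] nbrs).1, acc ++ (stepB v level [] nbrs).2) := by
  intro nbrs
  induction nbrs with
  | nil => intro v level acc; simp [stepB]
  | cons i rest ih =>
    intro v level acc
    simp only [stepB]
    split
    · simp only [List.nil_append]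
      rw [ih _ _ (acc ++ [i]), ih _ _ [i]]
      simp
    · exact ih _ _ acc

-- stepA equals stepB when x's distance is the current level
theorem stepA_eq_stepB : ∀ (nbrs : List Int) (v : List Int) (x level : Int) (acc : List Int),
    InR v.length x → v.getD (widx v.length x) 0 = level → 0 ≤ level →
    (∀ i ∈ nbrs, InR v.length i) →
    stepA v x acc nbrs = stepB v level acc nbrs := by
  intro nbrs
  induction nbrs with
  | nil => intro v x level acc _ _ _ _; rfl
  | cons i rest ih =>
    intro v x level acc hx0 hxl hl hnn
    have hi0 : InR v.length i := hnn i (by simp)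
    have hrest : ∀ j ∈ rest, InR v.length j := fun j hj => hnn j (by simp [hj])
    simp only [stepA, stepB]
    by_cases hc : PySem.List.pyGetD v i 0 = -1
    · rw [if_pos hc, if_pos hc]
      have hval : PySem.List.pyGetD v x 0 + 1 = level + 1 := by
        rw [pyGetD_widx v x 0 hx0, hxl]
      have hvi : v.getD (widx v.length i) 0 = -1 := by
        rw [pyGetD_widx v i 0 hi0] at hc; exact hc
      have hne : widx v.length x ≠ widx v.length i := by
        intro h; rw [← h, hxl] at hvi; omega
      rw [hval, pySetD_widx v i (level + 1) hi0]
      have hlen1 : (v.set (widx v.length i) (level + 1)).length = v.length := by simp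
      refine ih _ x level _ (by rw [hlen1]; exact hx0) ?_ hl (fun j hj => by rw [hlen1]; exact hrest j hj)
      rw [hlen1, getD_set_ne _ _ _ _ _ hne]
      exact hxl
    · rw [if_neg hc, if_neg hc]
      exact ih _ x level _ hx0 hxl hl hrest

-- master invariant lemma for stepB
theorem stepB_spec : ∀ (nbrs : List Int) (v : List Int) (level : Int) (acc : List Int),
    (∀ a ∈ v, -1 ≤ a) → (∀ i ∈ nbrs, InR v.length i) → 0 ≤ level →
    (stepB v level acc nbrs).1.length = v.length ∧
    (∀ a ∈ (stepB v level acc nbrs).1, -1 ≤ a) ∧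
    (∀ j : Nat, v.getD j 0 ≠ -1 → (stepB v level acc nbrs).1.getD j 0 = v.getD j 0) ∧
    (∀ i ∈ nbrs, (stepB v level acc nbrs).1.getD (widx v.length i) 0 ≠ -1) ∧
    (∃ d, (stepB v level acc nbrs).2 = acc ++ d ∧
      (∀ i ∈ d, InR v.length i ∧ v.getD (widx v.length i) 0 = -1 ∧
        (stepB v level acc nbrs).1.getD (widx v.length i) 0 = level + 1 ∧ i ∈ nbrs) ∧
      miss (stepB v level acc nbrs).1 + d.length = miss v ∧
      (∀ j : Nat, j < v.length → (stepB v level acc nbrs).1.getD j 0 = v.getD j 0 ∨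
        (v.getD j 0 = -1 ∧ (stepB v level acc nbrs).1.getD j 0 = level + 1 ∧
          ∃ i ∈ d, widx v.length i = j))) := by
  intro nbrs
  induction nbrs with
  | nil =>
    intro v level acc Hv _ _
    exact ⟨rfl, Hv, fun _ _ => rfl, by simp, [], by simp [stepB], by simp, by simp [stepB],
      fun j _ => Or.inl rfl⟩
  | cons i rest ih =>
    intro v level acc Hv Hn hl
    have hi0 : InR v.length i := Hn i (by simp)
    have hilt : widx v.length i < v.length := widx_lt _ _ hi0
    have Hn' : ∀ j ∈ rest, InR v.length j := fun j hj => Hn j (by simp [hj])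
    simp only [stepB]
    by_cases hc : PySem.List.pyGetD v i 0 = -1
    · rw [if_pos hc, pySetD_widx v i (level + 1) hi0]
      have hvi : v.getD (widx v.length i) 0 = -1 := by
        rw [pyGetD_widx v i 0 hi0] at hc; exact hc
      set v1 := v.set (widx v.length i) (level + 1) with hv1
      have hlen1 : v1.length = v.length := by simp [hv1]
      have hE1 : ∀ a ∈ v1, -1 ≤ a := by
        intro a ha
        rcases List.mem_or_eq_of_mem_set ha with h | h
        · exact Hv a h
        · omega
      have hgi1 : v1.getD (widx v.length i) 0 = level + 1 := getD_set_self _ _ _ _ hilt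
      have hgi1ne : v1.getD (widx v.length i) 0 ≠ -1 := by rw [hgi1]; omega
      have hP1 : ∀ j : Nat, v.getD j 0 ≠ -1 → v1.getD j 0 = v.getD j 0 := by
        intro j hj
        have : j ≠ widx v.length i := fun h => hj (by rw [h]; exact hvi)
        exact getD_set_ne _ _ _ _ _ this
      have hm1 : miss v1 + 1 = miss v :=
        count_set_neg_one v (widx v.length i) (level + 1) hilt hvi (by omega)
      obtain ⟨L, E, P, NB, d, hd, hp, hm, hch⟩ :=
        ih v1 level (acc ++ [i]) hE1 (fun j hj => by rw [hlen1]; exact Hn' j hj) hl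
      refine ⟨L.trans hlen1, E, ?_, ?_, i :: d, ?_, ?_, ?_, ?_⟩
      · intro j hj
        rw [P j (by rw [hP1 j hj]; exact hj), hP1 j hj]
      · intro i' hi'
        rcases List.mem_cons.mp hi' with h | h
        · subst h
          rw [P _ hgi1ne, hgi1]; omega
        · have := NB i' h
          rw [hlen1] at this
          exact this
      · rw [hd]; simp
      · intro i' hi'
        rcases List.mem_cons.mp hi' with h | h
        · subst h
          exact ⟨hi0, hvi, by rw [P _ hgi1ne]; exact hgi1, by simp⟩
        · obtain ⟨h1, h2, h3, h4⟩ := hp i' h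
          rw [hlen1] at h1 h2 h3
          refine ⟨h1, ?_, h3, by simp [h4]⟩
          by_cases he : widx v.length i' = widx v.length i
          · rw [he, hgi1] at h2; omega
          · rw [hv1, getD_set_ne _ _ _ _ _ he] at h2; exact h2
      · simp only [List.length_cons]
        omega
      · intro j hjlt
        rcases hch j (by rw [hlen1]; exact hjlt) with h | ⟨h1, h2, i', hi', hwi⟩
        · by_cases he : j = widx v.length i
          · subst he
            exact Or.inr ⟨hvi, by rw [h]; exact hgi1, ⟨i, by simp, rfl⟩⟩
          · exact Or.inl (by rw [h, hv1, getD_set_ne _ _ _ _ _ he])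
        · right
          have hne2 : j ≠ widx v.length i := by
            intro he; rw [he, hgi1] at h1; omega
          rw [hv1, getD_set_ne _ _ _ _ _ hne2] at h1
          rw [hlen1] at hwi
          exact ⟨h1, h2, ⟨i', by simp [hi'], hwi⟩⟩
    · rw [if_neg hc]
      have hvnei : v.getD (widx v.length i) 0 ≠ -1 := by
        rw [pyGetD_widx v i 0 hi0] at hc; exact hc
      obtain ⟨L, E, P, NB, d, hd, hp, hm, hch⟩ := ih v level acc Hv Hn' hl
      refine ⟨L, E, P, ?_, d, hd, ?_, hm, hch⟩
      · intro i' hi'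
        rcases List.mem_cons.mp hi' with h | h
        · subst h; rw [P _ hvnei]; exact hvnei
        · exact NB i' h
      · intro i' hi'
        obtain ⟨h1, h2, h3, h4⟩ := hp i' hi'
        exact ⟨h1, h2, h3, by simp [h4]⟩

-- the level fold only appends to its accumulator
theorem levelFold_acc (g : List (List Int)) (level : Int) :
    ∀ (front : List Int) (v : List Int) (acc : List Int),
    front.foldl (fun vn x => stepB vn.1 level vn.2 (PySem.List.pyGetD g x [])) (v, acc) =
      ((levelStep g level v front).1, acc ++ (levelStep g level v front).2) := by
  intro front
  induction front with
  | nil => intro v acc; simp [levelStep]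
  | cons x fr ih =>
    intro v acc
    have hL : levelStep g level v (x :: fr) =
        ((levelStep g level (stepB v level [] (PySem.List.pyGetD g x [])).1 fr).1,
          (stepB v level [] (PySem.List.pyGetD g x [])).2 ++
          (levelStep g level (stepB v level [] (PySem.List.pyGetD g x [])).1 fr).2) := by
      simp only [levelStep, List.foldl_cons]
      exact ih _ _
    simp only [List.foldl_cons]
    rw [stepB_acc _ v level acc, ih _ _, hL]
    simp [List.append_assoc]

theorem levelFold_acc' (g : List (List Int)) (level : Int) (front : List Int) (p : List Int × List Int) :
    front.foldl (fun vn x => stepB vn.1 level vn.2 (PySem.List.pyGetD g x [])) p =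
      ((levelStep g level p.1 front).1, p.2 ++ (levelStep g level p.1 front).2) :=
  levelFold_acc g level front p.1 p.2

-- master invariant lemma for one whole level
theorem levelStep_spec : ∀ (front : List Int) (g : List (List Int)) (v : List Int) (level : Int),
    (∀ a ∈ v, -1 ≤ a) →
    (∀ x ∈ front, InR v.length x ∧ v.getD (widx v.length x) 0 = level) →
    (∀ l ∈ g, ∀ i ∈ l, InR v.length i) → 0 ≤ level →
    (levelStep g level v front).1.length = v.length ∧
    (∀ a ∈ (levelStep g level v front).1, -1 ≤ a) ∧
    (∀ j : Nat, v.getD j 0 ≠ -1 → (levelStep g level v front).1.getD j 0 = v.getD j 0) ∧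
    (∀ i ∈ (levelStep g level v front).2, InR v.length i ∧ v.getD (widx v.length i) 0 = -1 ∧
        (levelStep g level v front).1.getD (widx v.length i) 0 = level + 1 ∧
        ∃ x ∈ front, i ∈ PySem.List.pyGetD g x []) ∧
    (miss (levelStep g level v front).1 + (levelStep g level v front).2.length = miss v) ∧
    (∀ j : Nat, j < v.length → (levelStep g level v front).1.getD j 0 = v.getD j 0 ∨
      (v.getD j 0 = -1 ∧ (levelStep g level v front).1.getD j 0 = level + 1 ∧
        ∃ i ∈ (levelStep g level v front).2, widx v.length i = j)) ∧
    (∀ x ∈ front, ∀ i ∈ PySem.List.pyGetD g x [],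
        (levelStep g level v front).1.getD (widx v.length i) 0 ≠ -1) := by
  intro front
  induction front with
  | nil =>
    intro g v level Hv _ _ _
    refine ⟨rfl, Hv, fun _ _ => rfl, by simp [levelStep], by simp [levelStep],
      fun j _ => Or.inl rfl, by simp⟩
  | cons x fr ih =>
    intro g v level Hv Hf hg hl
    have hx := Hf x (by simp)
    have hnbr : ∀ i ∈ PySem.List.pyGetD g x [], InR v.length i :=
      mem_pyGetD_graph hg x
    obtain ⟨L1, E1, P1, NB1, d1, hd1, hp1, hm1, hch1⟩ :=
      stepB_spec (PySem.List.pyGetD g x []) v level [] Hv hnbr hl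
    set S := stepB v level [] (PySem.List.pyGetD g x []) with hS
    have hstep : levelStep g level v (x :: fr) =
        ((levelStep g level S.1 fr).1, S.2 ++ (levelStep g level S.1 fr).2) := by
      simp only [levelStep, List.foldl_cons]
      exact levelFold_acc' g level fr S
    have hf' : ∀ x' ∈ fr, InR S.1.length x' ∧ S.1.getD (widx S.1.length x') 0 = level := by
      intro x' hx'
      obtain ⟨h1, h2⟩ := Hf x' (by simp [hx'])
      have hne : v.getD (widx v.length x') 0 ≠ -1 := by rw [h2]; omega
      rw [L1]
      exact ⟨h1, by rw [P1 _ hne, h2]⟩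
    have hg' : ∀ l ∈ g, ∀ i ∈ l, InR S.1.length i := by
      intro l hli i hil
      rw [L1]
      exact hg l hli i hil
    obtain ⟨L2, E2, P2, hp2, hm2, hch2, hrlx2⟩ := ih g S.1 level E1 hf' hg' hl
    rw [hstep]
    simp only at *
    have hd1eq : d1 = S.2 := by rw [hd1]; simp
    subst hd1eq
    refine ⟨L2.trans L1, E2, ?_, ?_, ?_, ?_, ?_⟩
    · intro j hj
      rw [P2 j (by rw [P1 j hj]; exact hj), P1 j hj]
    · intro i hi
      rcases List.mem_append.mp hi with h | h
      · obtain ⟨h1, h2, h3, h4⟩ := hp1 i h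
        refine ⟨h1, h2, ?_, ⟨x, by simp, h4⟩⟩
        rw [L1] at *
        rw [P2 (widx v.length i) (by rw [h3]; omega), h3]
      · obtain ⟨h1, h2, h3, x', hx', h4⟩ := hp2 i h
        rw [L1] at h1 h2 h3
        refine ⟨h1, ?_, h3, ⟨x', by simp [hx'], h4⟩⟩
        by_cases hvo : v.getD (widx v.length i) 0 = -1
        · exact hvo
        · rw [P1 _ hvo] at h2; exact absurd h2 hvo
    · have hlen2 : (levelStep g level S.1 fr).2.length + S.2.length = (S.2 ++ (levelStep g level S.1 fr).2).length := by
        simp [Nat.add_comm]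
      simp only [List.length_append]
      omega
    · intro j hjlt
      rcases hch2 j (by rw [L1]; exact hjlt) with h | ⟨h1, h2, i', hi', hwi⟩
      · rcases hch1 j hjlt with h' | ⟨h1', h2', i', hi', hwi'⟩
        · exact Or.inl (by rw [h, h'])
        · exact Or.inr ⟨h1', by rw [h, h2'], ⟨i', List.mem_append_left _ hi', hwi'⟩⟩
      · right
        have hv1 : v.getD j 0 = -1 := by
          by_cases hvo : v.getD j 0 = -1
          · exact hvo
          · rw [P1 _ hvo] at h1; exact absurd h1 hvo
        rw [L1] at hwi
        exact ⟨hv1, h2, ⟨i', List.mem_append_right _ hi', hwi⟩⟩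
    · intro x' hx' i hi
      rcases List.mem_cons.mp hx' with h | h
      · subst h
        have := NB1 i hi
        rw [P2 _ this]
        exact this
      · have := hrlx2 x' h i hi
        rw [L1] at this
        exact this

theorem bfsA_nil (g : List (List Int)) (f : Nat) (v : List Int) : bfsA g f v [] = v := by
  cases f <;> rfl

theorem bfsB_nil (g : List (List Int)) (f : Nat) (level : Int) (v : List Int) :
    bfsB g f level v [] = v := by
  cases f <;> simp [bfsB]

theorem bfsB_cons (g : List (List Int)) (f : Nat) (level : Int) (v : List Int) (x : Int) (fr : List Int) :
    bfsB g (f+1) level v (x :: fr) =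
      bfsB g f (level+1) (levelStep g level v (x :: fr)).1 (levelStep g level v (x :: fr)).2 := by
  simp [bfsB]

-- queue bridging: |front| pops of A's loop perform exactly one whole level
theorem bfsA_level : ∀ (front : List Int) (g : List (List Int)) (f : Nat) (v : List Int) (rest : List Int) (level : Int),
    (∀ a ∈ v, -1 ≤ a) →
    (∀ x ∈ front, InR v.length x ∧ v.getD (widx v.length x) 0 = level) →
    (∀ l ∈ g, ∀ i ∈ l, InR v.length i) → 0 ≤ level →
    bfsA g (front.length + f) v (front ++ rest) =
      bfsA g f (levelStep g level v front).1 (rest ++ (levelStep g level v front).2) := by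
  intro front
  induction front with
  | nil =>
    intro g f v rest level _ _ _ _
    simp only [levelStep, List.foldl_nil, List.length_nil, Nat.zero_add, List.nil_append,
      List.append_nil]
  | cons x fr ih =>
    intro g f v rest level Hv Hf hg hl
    obtain ⟨hx0, hxl⟩ := Hf x (by simp)
    have hnbr : ∀ i ∈ PySem.List.pyGetD g x [], InR v.length i :=
      mem_pyGetD_graph hg x
    obtain ⟨L1, E1, P1, NB1, d1, hd1, hp1, hm1, hch1⟩ :=
      stepB_spec (PySem.List.pyGetD g x []) v level [] Hv hnbr hl
    set S := stepB v level [] (PySem.List.pyGetD g x []) with hS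
    have h1 : bfsA g ((x :: fr).length + f) v ((x :: fr) ++ rest) =
        bfsA g (fr.length + f) S.1 ((fr ++ rest) ++ S.2) := by
      have e : (x :: fr).length + f = fr.length + f + 1 := by simp [Nat.add_comm, Nat.add_assoc]
      rw [e, List.cons_append]
      simp only [bfsA]
      rw [stepA_eq_stepB _ v x level (fr ++ rest) hx0 hxl hl hnbr]
      rw [stepB_acc _ v level (fr ++ rest), ← hS]
    rw [h1, List.append_assoc]
    have hf' : ∀ x' ∈ fr, InR S.1.length x' ∧ S.1.getD (widx S.1.length x') 0 = level := by
      intro x' hx'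
      obtain ⟨h1', h2'⟩ := Hf x' (by simp [hx'])
      have hne : v.getD (widx v.length x') 0 ≠ -1 := by rw [h2']; omega
      rw [L1]
      exact ⟨h1', by rw [P1 _ hne, h2']⟩
    have hg' : ∀ l ∈ g, ∀ i ∈ l, InR S.1.length i := by
      intro l hli i hil
      rw [L1]
      exact hg l hli i hil
    rw [ih g f S.1 (rest ++ S.2) level E1 hf' hg' hl]
    have hstep : levelStep g level v (x :: fr) =
        ((levelStep g level S.1 fr).1, S.2 ++ (levelStep g level S.1 fr).2) := by
      simp only [levelStep, List.foldl_cons]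
      exact levelFold_acc' g level fr S
    rw [hstep]
    simp [List.append_assoc]

-- fuel irrelevance for the reference loop once the fuel covers the exact remaining count
theorem bfsB_fuel : ∀ (k : Nat) (g : List (List Int)) (f : Nat) (level : Int) (v : List Int) (front : List Int),
    k = miss v + front.length →
    (∀ a ∈ v, -1 ≤ a) →
    (∀ x ∈ front, InR v.length x ∧ v.getD (widx v.length x) 0 = level) →
    (∀ l ∈ g, ∀ i ∈ l, InR v.length i) → 0 ≤ level →
    bfsB g (k + f) level v front = bfsB g k level v front := by
  intro k
  induction k using Nat.strong_induction_on with
  | _ k ihk =>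
    intro g f level v front hk Hv Hf hg hl
    cases front with
    | nil => rw [bfsB_nil, bfsB_nil]
    | cons x fr =>
      obtain ⟨L, E, P, hp, hm, hch, hrlx⟩ := levelStep_spec (x :: fr) g v level Hv Hf hg hl
      set V1 := (levelStep g level v (x :: fr)).1
      set F1 := (levelStep g level v (x :: fr)).2
      have hk1 : 1 ≤ k := by simp only [List.length_cons] at hk; omega
      obtain ⟨k', rfl⟩ : ∃ k', k = k' + 1 := ⟨k - 1, by omega⟩
      have e1 : k' + 1 + f = (k' + f) + 1 := by omega
      rw [e1, bfsB_cons, bfsB_cons]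
      have hf1 : ∀ x' ∈ F1, InR V1.length x' ∧ V1.getD (widx V1.length x') 0 = level + 1 := by
        intro x' hx'
        obtain ⟨h1, h2, h3, h4⟩ := hp x' hx'
        rw [L]
        exact ⟨h1, h3⟩
      have hg1 : ∀ l ∈ g, ∀ i ∈ l, InR V1.length i := by
        intro l hli i hil
        rw [L]
        exact hg l hli i hil
      have hle : miss V1 + F1.length ≤ k' := by
        simp only [List.length_cons] at hk; omega
      have e2 : k' + f = (miss V1 + F1.length) + (f + (k' - (miss V1 + F1.length))) := by omega
      have e3 : k' = (miss V1 + F1.length) + (k' - (miss V1 + F1.length)) := by omega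
      rw [e2, ihk (miss V1 + F1.length) (by omega) g _ (level+1) V1 F1 rfl E hf1 hg1 (by omega)]
      conv_rhs => rw [e3, ihk (miss V1 + F1.length) (by omega) g _ (level+1) V1 F1 rfl E hf1 hg1 (by omega)]

-- the main equivalence of A's deque loop and the reference level loop
theorem bfs_equiv : ∀ (k : Nat) (g : List (List Int)) (level : Int) (v : List Int) (front : List Int),
    k = miss v + front.length →
    (∀ a ∈ v, -1 ≤ a) →
    (∀ x ∈ front, InR v.length x ∧ v.getD (widx v.length x) 0 = level) →
    (∀ l ∈ g, ∀ i ∈ l, InR v.length i) → 0 ≤ level →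
    bfsA g k v front = bfsB g k level v front := by
  intro k
  induction k using Nat.strong_induction_on with
  | _ k ihk =>
    intro g level v front hk Hv Hf hg hl
    cases front with
    | nil => rw [bfsA_nil, bfsB_nil]
    | cons x fr =>
      obtain ⟨L, E, P, hp, hm, hch, hrlx⟩ := levelStep_spec (x :: fr) g v level Hv Hf hg hl
      set V1 := (levelStep g level v (x :: fr)).1
      set F1 := (levelStep g level v (x :: fr)).2
      have hA : bfsA g k v (x :: fr) = bfsA g (miss v) V1 F1 := by
        have := bfsA_level (x :: fr) g (miss v) v [] level Hv Hf hg hl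
        rw [List.append_nil, List.nil_append] at this
        rw [show k = (x :: fr).length + miss v from by
          simp only [List.length_cons] at hk ⊢; omega]
        exact this
      have hf1 : ∀ x' ∈ F1, InR V1.length x' ∧ V1.getD (widx V1.length x') 0 = level + 1 := by
        intro x' hx'
        obtain ⟨h1, h2, h3, h4⟩ := hp x' hx'
        rw [L]
        exact ⟨h1, h3⟩
      have hg1 : ∀ l ∈ g, ∀ i ∈ l, InR V1.length i := by
        intro l hli i hil
        rw [L]
        exact hg l hli i hil
      have hm' : miss V1 + F1.length = miss v := hm
      have hlt : miss v < k := by simp only [List.length_cons] at hk; omega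
      rw [hA, ihk (miss v) hlt g (level+1) V1 F1 hm'.symm E hf1 hg1 (by omega)]
      obtain ⟨k', rfl⟩ : ∃ k', k = k' + 1 := ⟨k - 1, by omega⟩
      rw [bfsB_cons]
      have e3 : k' = (miss V1 + F1.length) + (k' - (miss V1 + F1.length)) := by
        simp only [List.length_cons] at hk; omega
      rw [e3, bfsB_fuel (miss V1 + F1.length) g _ (level+1) V1 F1 rfl E hf1 hg1 (by omega), hm']

theorem ge_getD (v : List Int) (Hge : ∀ x ∈ v, -1 ≤ x) (j : Nat) : -1 ≤ v.getD j 0 := by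
  rcases Nat.lt_or_ge j v.length with h | h
  · rw [List.getD_eq_getElem _ _ h]
    exact Hge _ (List.getElem_mem h)
  · rw [List.getD_eq_default _ _ (by simpa using h)]
    norm_num

theorem getD_graph_mem (g : List (List Int)) (u : Nat) (hu : u < g.length) : g.getD u [] ∈ g := by
  rw [List.getD_eq_getElem _ _ hu]
  exact List.getElem_mem hu

theorem pyGetD_g (g : List (List Int)) (x : Int) (L : Nat) (hgl : g.length = L) (hx : InR L x) :
    PySem.List.pyGetD g x [] = g.getD (widx L x) [] := by
  rw [pyGetD_widx g x [] (by rw [hgl]; exact hx), hgl]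

-- ---- post-conditions of the reference BFS result ----

-- what the final BFS array satisfies: bounds, 0 only at the destination,
-- triangle inequality along every graph edge, and a witness edge for every positive value
def Wpost (g : List (List Int)) (dIdx len : Nat) (bound : Int) (W : List Int) : Prop :=
  W.length = len ∧ (∀ a ∈ W, -1 ≤ a) ∧ (∀ j : Nat, j < len → W.getD j 0 ≤ bound) ∧
  W.getD dIdx 0 = 0 ∧ (∀ j : Nat, j < len → W.getD j 0 = 0 → j = dIdx) ∧
  (∀ u : Nat, u < len → ∀ i ∈ g.getD u [], W.getD u 0 ≠ -1 →
      W.getD (widx len i) 0 ≠ -1 ∧ W.getD (widx len i) 0 ≤ W.getD u 0 + 1) ∧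
  (∀ j : Nat, j < len → 1 ≤ W.getD j 0 →
      ∃ u : Nat, u < len ∧ (∃ i ∈ g.getD u [], widx len i = j) ∧ W.getD u 0 = W.getD j 0 - 1)

theorem Wpost_mono (g : List (List Int)) (dIdx len : Nat) (b1 b2 : Int) (h : b1 ≤ b2)
    (W : List Int) (hW : Wpost g dIdx len b1 W) : Wpost g dIdx len b2 W := by
  obtain ⟨c1, c2, c3, c4, c5, c6, c7⟩ := hW
  exact ⟨c1, c2, fun j hj => le_trans (c3 j hj) h, c4, c5, c6, c7⟩

theorem bfsB_post (dIdx : Nat) : ∀ (k : Nat) (g : List (List Int)) (fuel : Nat) (level : Int) (v front : List Int),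
    miss v + front.length ≤ k → k ≤ fuel → 0 ≤ level →
    g.length = v.length → (∀ l ∈ g, ∀ i ∈ l, InR v.length i) →
    dIdx < v.length → v.getD dIdx 0 = 0 →
    (∀ a ∈ v, -1 ≤ a) →
    (∀ j : Nat, j < v.length → v.getD j 0 ≤ level) →
    (∀ j : Nat, j < v.length → v.getD j 0 = 0 → j = dIdx) →
    (∀ x ∈ front, InR v.length x ∧ v.getD (widx v.length x) 0 = level) →
    (∀ j : Nat, j < v.length → v.getD j 0 = level → ∃ x ∈ front, widx v.length x = j) →
    (∀ u : Nat, u < v.length → ∀ i ∈ g.getD u [], v.getD u 0 ≠ -1 → v.getD u 0 < level →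
        v.getD (widx v.length i) 0 ≠ -1 ∧ v.getD (widx v.length i) 0 ≤ v.getD u 0 + 1) →
    (∀ j : Nat, j < v.length → 1 ≤ v.getD j 0 →
        ∃ u : Nat, u < v.length ∧ (∃ i ∈ g.getD u [], widx v.length i = j) ∧
          v.getD u 0 = v.getD j 0 - 1) →
    Wpost g dIdx v.length (level + (k : Int)) (bfsB g fuel level v front) := by
  intro k
  induction k using Nat.strong_induction_on with
  | _ k ihk =>
    intro g fuel level v front hk hfuel hl hgl hgr hdlt hd0 Hge Hub H0 Hfront Hcomp Htri Hwit
    cases front with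
    | nil =>
      rw [bfsB_nil]
      unfold Wpost
      refine ⟨rfl, Hge, ?_, hd0, H0, ?_, Hwit⟩
      · intro j hj
        have h1 := Hub j hj
        omega
      · intro u hu i hi hne
        have hlt : v.getD u 0 < level := by
          have h1 := Hub u hu
          rcases lt_or_eq_of_le h1 with h | h
          · exact h
          · obtain ⟨x, hx, _⟩ := Hcomp u hu h
            simp at hx
        exact Htri u hu i hi hne hlt
    | cons x fr =>
      have hk1 : 1 ≤ k := by simp only [List.length_cons] at hk; omega
      cases fuel with
      | zero => omega
      | succ f =>
        obtain ⟨L, E, P, hp, hm, hch, hrlx⟩ := levelStep_spec (x :: fr) g v level Hge Hfront hgr hl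
        rw [bfsB_cons]
        set V1 := (levelStep g level v (x :: fr)).1 with hV1
        set F1 := (levelStep g level v (x :: fr)).2 with hF1
        have hgl1 : g.length = V1.length := by rw [L]; exact hgl
        have hgr1 : ∀ l ∈ g, ∀ i ∈ l, InR V1.length i := by
          intro l hli i hil; rw [L]; exact hgr l hli i hil
        have hdlt1 : dIdx < V1.length := by rw [L]; exact hdlt
        have hd01 : V1.getD dIdx 0 = 0 := by rw [P dIdx (by rw [hd0]; omega), hd0]
        have Hub1 : ∀ j : Nat, j < V1.length → V1.getD j 0 ≤ level + 1 := by
          intro j hj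
          rw [L] at hj
          rcases hch j hj with h | ⟨_, h2, _⟩
          · have := Hub j hj; omega
          · omega
        have H01 : ∀ j : Nat, j < V1.length → V1.getD j 0 = 0 → j = dIdx := by
          intro j hj h0
          rw [L] at hj
          rcases hch j hj with h | ⟨_, h2, _⟩
          · exact H0 j hj (by rw [← h]; exact h0)
          · rw [h0] at h2; omega
        have Hfront1 : ∀ x' ∈ F1, InR V1.length x' ∧ V1.getD (widx V1.length x') 0 = level + 1 := by
          intro x' hx'
          obtain ⟨h1, _, h3, _⟩ := hp x' hx'
          rw [L]
          exact ⟨h1, h3⟩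
        have Hcomp1 : ∀ j : Nat, j < V1.length → V1.getD j 0 = level + 1 →
            ∃ x' ∈ F1, widx V1.length x' = j := by
          intro j hj hlvl
          rw [L] at hj ⊢
          rcases hch j hj with h | ⟨_, _, i, hi, hwi⟩
          · exfalso; have := Hub j hj; rw [← h, hlvl] at this; omega
          · exact ⟨i, hi, hwi⟩
        have Htri1 : ∀ u : Nat, u < V1.length → ∀ i ∈ g.getD u [], V1.getD u 0 ≠ -1 →
            V1.getD u 0 < level + 1 →
            V1.getD (widx V1.length i) 0 ≠ -1 ∧ V1.getD (widx V1.length i) 0 ≤ V1.getD u 0 + 1 := by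
          intro u hu i hi hne hltl
          rw [L] at hu ⊢
          have hiI : InR v.length i := hgr _ (getD_graph_mem g u (by rw [hgl]; exact hu)) i hi
          have hwlt : widx v.length i < v.length := widx_lt _ _ hiI
          rcases hch u hu with h | ⟨_, h2, _⟩
          case inr => rw [h2] at hltl; omega
          · have hvu_ne : v.getD u 0 ≠ -1 := by rw [← h]; exact hne
            have hvu_le : v.getD u 0 ≤ level := Hub u hu
            rcases lt_or_eq_of_le hvu_le with hcase | hcase
            · obtain ⟨hn1, hn2⟩ := Htri u hu i hi hvu_ne hcase
              exact ⟨by rw [P _ hn1]; exact hn1, by rw [P _ hn1, h]; exact hn2⟩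
            · obtain ⟨x', hx', hwx⟩ := Hcomp u hu hcase
              have hxI : InR v.length x' := (Hfront x' hx').1
              have hgix : i ∈ PySem.List.pyGetD g x' [] := by
                rw [pyGetD_g g x' v.length hgl hxI, hwx]; exact hi
              have hne1 := hrlx x' hx' i hgix
              refine ⟨hne1, ?_⟩
              rcases hch (widx v.length i) hwlt with hh | ⟨_, hh2, _⟩
              · rw [hh, h]
                have := Hub (widx v.length i) hwlt
                omega
              · rw [hh2, h]
                omega
        have Hwit1 : ∀ j : Nat, j < V1.length → 1 ≤ V1.getD j 0 →
            ∃ u : Nat, u < V1.length ∧ (∃ i ∈ g.getD u [], widx V1.length i = j) ∧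
              V1.getD u 0 = V1.getD j 0 - 1 := by
          intro j hj h1
          rw [L] at hj ⊢
          rcases hch j hj with h | ⟨_, h2, i, hiF, hwi⟩
          · obtain ⟨u, hu, hedge, hval⟩ := Hwit j hj (by rw [← h]; exact h1)
            have hvj_ge : -1 ≤ v.getD j 0 := ge_getD v Hge j
            have hvu_ne : v.getD u 0 ≠ -1 := by rw [hval]; rw [h] at h1; omega
            exact ⟨u, hu, hedge, by rw [P u hvu_ne, hval, h]⟩
          · obtain ⟨hiI, hiold, hival, x', hx', hinb⟩ := hp i hiF
            have hxI : InR v.length x' := (Hfront x' hx').1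
            have hxval : v.getD (widx v.length x') 0 = level := (Hfront x' hx').2
            refine ⟨widx v.length x', widx_lt _ _ hxI, ⟨i, ?_, hwi⟩, ?_⟩
            · rw [← pyGetD_g g x' v.length hgl hxI]; exact hinb
            · rw [P _ (by rw [hxval]; omega), hxval, h2]
              omega
        have hklt : miss V1 + F1.length < k := by simp only [List.length_cons] at hk; omega
        have hres := ihk (miss V1 + F1.length) hklt g f (level+1) V1 F1 (le_refl _)
          (by omega) (by omega) hgl1 hgr1 hdlt1 hd01 E Hub1 H01 Hfront1 Hcomp1 Htri1 Hwit1
        rw [L] at hres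
        refine Wpost_mono _ _ _ _ _ ?_ _ hres
        have : (miss V1 + F1.length : Int) + 1 ≤ (k : Int) := by exact_mod_cast hklt
        push_cast at this ⊢
        omega

-- ---- characterization of the built adjacency list in terms of the raw roads ----

theorem length_addRoad (g : List (List Int)) (r : List Int) : (addRoad g r).length = g.length := by
  simp [addRoad, PySem.List.length_pySetD]

theorem foldl_addRoad_length : ∀ (rs : List (List Int)) (g0 : List (List Int)),
    (rs.foldl addRoad g0).length = g0.length := by
  intro rs
  induction rs with
  | nil => intro g0; rfl
  | cons r rs ih => intro g0; rw [List.foldl_cons, ih, length_addRoad]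

theorem buildGraph_length (n : Int) (roads : List (List Int)) :
    (buildGraph n roads).length = (n+1).toNat := by
  unfold buildGraph
  rw [foldl_addRoad_length]
  simp

theorem addRoad_getD_mem (g : List (List Int)) (r : List Int)
    (ha : InR g.length (r.getD 0 0)) (hb : InR g.length (r.getD 1 0)) (u : Nat) (i : Int) :
    i ∈ (addRoad g r).getD u [] ↔ i ∈ g.getD u [] ∨
      (widx g.length (r.getD 0 0) = u ∧ i = r.getD 1 0) ∨
      (widx g.length (r.getD 1 0) = u ∧ i = r.getD 0 0) := by
  have ea : PySem.List.pyGetD r 0 0 = r.getD 0 0 := PySem.List.pyGetD_zero r 0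
  have eb : PySem.List.pyGetD r 1 0 = r.getD 1 0 := by
    rw [PySem.List.pyGetD_of_nonneg _ _ (by norm_num)]
    norm_num
  have hailt : widx g.length (r.getD 0 0) < g.length := widx_lt _ _ ha
  have hbilt : widx g.length (r.getD 1 0) < g.length := widx_lt _ _ hb
  have step1 : addRoad g r =
      (g.set (widx g.length (r.getD 0 0)) (g.getD (widx g.length (r.getD 0 0)) [] ++ [r.getD 1 0])).set
        (widx g.length (r.getD 1 0))
        ((g.set (widx g.length (r.getD 0 0))
            (g.getD (widx g.length (r.getD 0 0)) [] ++ [r.getD 1 0])).getD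
          (widx g.length (r.getD 1 0)) [] ++ [r.getD 0 0]) := by
    show PySem.List.pySetD
        (PySem.List.pySetD g (PySem.List.pyGetD r 0 0)
          (PySem.List.pyGetD g (PySem.List.pyGetD r 0 0) [] ++ [PySem.List.pyGetD r 1 0]))
        (PySem.List.pyGetD r 1 0)
        (PySem.List.pyGetD
          (PySem.List.pySetD g (PySem.List.pyGetD r 0 0)
            (PySem.List.pyGetD g (PySem.List.pyGetD r 0 0) [] ++ [PySem.List.pyGetD r 1 0]))
          (PySem.List.pyGetD r 1 0) [] ++ [PySem.List.pyGetD r 0 0]) = _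
    rw [ea, eb]
    rw [pyGetD_widx g (r.getD 0 0) [] ha, pySetD_widx g (r.getD 0 0) _ ha]
    have hlen1 : (g.set (widx g.length (r.getD 0 0))
        (g.getD (widx g.length (r.getD 0 0)) [] ++ [r.getD 1 0])).length = g.length := by simp
    rw [pyGetD_widx _ (r.getD 1 0) [] (by rw [hlen1]; exact hb),
      pySetD_widx _ (r.getD 1 0) _ (by rw [hlen1]; exact hb), hlen1]
  rw [step1]
  set ai := widx g.length (r.getD 0 0) with haidef
  set bi := widx g.length (r.getD 1 0) with hbidef
  set g1 := g.set ai (g.getD ai [] ++ [r.getD 1 0]) with hg1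
  have hg1len : g1.length = g.length := by simp [hg1]
  have e_g1 : ∀ u' : Nat, g1.getD u' [] =
      if u' = ai then g.getD ai [] ++ [r.getD 1 0] else g.getD u' [] := by
    intro u'
    split_ifs with h
    · subst h; exact getD_set_self _ _ _ _ hailt
    · exact getD_set_ne _ _ _ _ _ h
  have e_res : ∀ u' : Nat, (g1.set bi (g1.getD bi [] ++ [r.getD 0 0])).getD u' [] =
      if u' = bi then g1.getD bi [] ++ [r.getD 0 0] else g1.getD u' [] := by
    intro u'
    split_ifs with h
    · subst h; exact getD_set_self _ _ _ _ (by rw [hg1len]; exact hbilt)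
    · exact getD_set_ne _ _ _ _ _ h
  rw [e_res u]
  by_cases h1 : u = bi
  · rw [if_pos h1, e_g1 bi]
    by_cases h2 : bi = ai
    · rw [if_pos h2]
      subst h1
      rw [h2]
      simp only [List.mem_append, List.mem_singleton]
      tauto
    · rw [if_neg h2]
      subst h1
      simp only [List.mem_append, List.mem_singleton]
      constructor
      · rintro (h | h)
        · exact Or.inl h
        · exact Or.inr (Or.inr ⟨by trivial, h⟩)
      · rintro (h | ⟨hh, hv⟩ | ⟨_, hv⟩)
        · exact Or.inl h
        · exact absurd hh.symm h2
        · exact Or.inr hv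
  · rw [if_neg h1, e_g1 u]
    by_cases h2 : u = ai
    · rw [if_pos h2]
      subst h2
      simp only [List.mem_append, List.mem_singleton]
      constructor
      · rintro (h | h)
        · exact Or.inl h
        · exact Or.inr (Or.inl ⟨by trivial, h⟩)
      · rintro (h | ⟨_, hv⟩ | ⟨hh, hv⟩)
        · exact Or.inl h
        · exact Or.inr hv
        · exact absurd hh.symm h1
    · rw [if_neg h2]
      constructor
      · exact fun h => Or.inl h
      · rintro (h | ⟨hh, _⟩ | ⟨hh, _⟩)
        · exact h
        · exact absurd hh (fun he => h2 he.symm)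
        · exact absurd hh (fun he => h1 he.symm)

theorem buildGraph_getD_mem (n : Int) (roads : List (List Int)) (hn : 0 ≤ n)
    (hroads : ∀ r ∈ roads, InR (n+1).toNat (r.getD 0 0) ∧ InR (n+1).toNat (r.getD 1 0))
    (u : Nat) (i : Int) :
    i ∈ (buildGraph n roads).getD u [] ↔
      ∃ r ∈ roads, (widx (n+1).toNat (r.getD 0 0) = u ∧ i = r.getD 1 0) ∨
        (widx (n+1).toNat (r.getD 1 0) = u ∧ i = r.getD 0 0) := by
  have main : ∀ (rs : List (List Int)) (g0 : List (List Int)), g0.length = (n+1).toNat →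
      (∀ r ∈ rs, InR (n+1).toNat (r.getD 0 0) ∧ InR (n+1).toNat (r.getD 1 0)) →
      ∀ (u : Nat) (i : Int),
      (i ∈ (rs.foldl addRoad g0).getD u [] ↔ i ∈ g0.getD u [] ∨
        ∃ r ∈ rs, (widx (n+1).toNat (r.getD 0 0) = u ∧ i = r.getD 1 0) ∨
          (widx (n+1).toNat (r.getD 1 0) = u ∧ i = r.getD 0 0)) := by
    intro rs
    induction rs with
    | nil => intro g0 h0 _ u i; simp
    | cons r rs ih =>
      intro g0 h0 hr u i
      rw [List.foldl_cons]
      have hmem := addRoad_getD_mem g0 r (by rw [h0]; exact (hr r (by simp)).1)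
        (by rw [h0]; exact (hr r (by simp)).2) u i
      rw [h0] at hmem
      rw [ih (addRoad g0 r) (by rw [length_addRoad, h0]) (fun r' h' => hr r' (by simp [h'])) u i,
        hmem]
      constructor
      · rintro ((h | h | h) | ⟨r', hr', hc⟩)
        · exact Or.inl h
        · exact Or.inr ⟨r, List.mem_cons_self, Or.inl h⟩
        · exact Or.inr ⟨r, List.mem_cons_self, Or.inr h⟩
        · exact Or.inr ⟨r', List.mem_cons_of_mem _ hr', hc⟩
      · rintro (h | ⟨r', hr', hc⟩)
        · exact Or.inl (Or.inl h)
        · rcases List.mem_cons.mp hr' with he | he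
          · subst he
            rcases hc with hc | hc
            · exact Or.inl (Or.inr (Or.inl hc))
            · exact Or.inl (Or.inr (Or.inr hc))
          · exact Or.inr ⟨r', he, hc⟩
  have hrep : (List.replicate (n+1).toNat ([] : List Int)).getD u [] = [] := by
    rcases Nat.lt_or_ge u (n+1).toNat with h | h
    · rw [List.getD_eq_getElem _ _ (by simpa using h)]
      simp
    · rw [List.getD_eq_default _ _ (by simpa using h)]
  unfold buildGraph
  rw [main roads _ (by simp) hroads u i, hrep]
  simp

-- range of the built adjacency list (all stored labels are in index range)
theorem buildGraph_range (n : Int) (roads : List (List Int)) (hn : 0 ≤ n)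
    (h : ∀ r ∈ roads, InR (n+1).toNat (r.getD 0 0) ∧ InR (n+1).toNat (r.getD 1 0)) :
    ∀ l ∈ buildGraph n roads, ∀ i ∈ l, InR (n+1).toNat i := by
  intro l hl i hi
  obtain ⟨u, hu, hgu⟩ := List.mem_iff_getElem.mp hl
  have hlu : (buildGraph n roads).getD u [] = l := by
    rw [List.getD_eq_getElem _ _ hu]; exact hgu
  obtain ⟨r, hr, hcase⟩ := (buildGraph_getD_mem n roads hn h u i).mp (by rw [hlu]; exact hi)
  rcases hcase with ⟨_, rfl⟩ | ⟨_, rfl⟩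
  · exact (h r hr).2
  · exact (h r hr).1

-- ---- lemmas about B's Bellman-Ford relaxation ----

-- a relaxation step on resolved (natural) indices
def relaxN1 (v : List Int) (c : Bool) (ai bi : Nat) : List Int × Bool :=
  if v.getD ai 0 ≠ -1 ∧ (v.getD bi 0 = -1 ∨ v.getD ai 0 + 1 < v.getD bi 0) then
    (v.set bi (v.getD ai 0 + 1), true)
  else (v, c)

theorem relax1_eq (v : List Int) (c : Bool) (a b : Int)
    (ha : InR v.length a) (hb : InR v.length b) :
    relax1 v c a b = relaxN1 v c (widx v.length a) (widx v.length b) := by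
  unfold relax1 relaxN1
  rw [pyGetD_widx v a 0 ha, pyGetD_widx v b 0 hb, pySetD_widx v b _ hb]

theorem length_relaxN1 (v : List Int) (c : Bool) (ai bi : Nat) :
    (relaxN1 v c ai bi).1.length = v.length := by
  unfold relaxN1; split_ifs <;> simp

theorem relaxRoad_eq (v : List Int) (c : Bool) (r : List Int)
    (ha : InR v.length (r.getD 0 0)) (hb : InR v.length (r.getD 1 0)) :
    relaxRoad v c r =
      relaxN1 (relaxN1 v c (widx v.length (r.getD 0 0)) (widx v.length (r.getD 1 0))).1
        (relaxN1 v c (widx v.length (r.getD 0 0)) (widx v.length (r.getD 1 0))).2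
        (widx v.length (r.getD 1 0)) (widx v.length (r.getD 0 0)) := by
  have ea : PySem.List.pyGetD r 0 0 = r.getD 0 0 := PySem.List.pyGetD_zero r 0
  have eb : PySem.List.pyGetD r 1 0 = r.getD 1 0 := by
    rw [PySem.List.pyGetD_of_nonneg _ _ (by norm_num)]
    norm_num
  show relax1 (relax1 v c (PySem.List.pyGetD r 0 0) (PySem.List.pyGetD r 1 0)).1
      (relax1 v c (PySem.List.pyGetD r 0 0) (PySem.List.pyGetD r 1 0)).2
      (PySem.List.pyGetD r 1 0) (PySem.List.pyGetD r 0 0) = _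
  rw [ea, eb, relax1_eq v c _ _ ha hb]
  have hlen : (relaxN1 v c (widx v.length (r.getD 0 0)) (widx v.length (r.getD 1 0))).1.length
      = v.length := length_relaxN1 _ _ _ _
  rw [relax1_eq _ _ _ _ (by rw [hlen]; exact hb) (by rw [hlen]; exact ha), hlen]

theorem relax1_flag (v : List Int) (c : Bool) (a b : Int)
    (h : (relax1 v c a b).2 = false) : (relax1 v c a b).1 = v ∧ c = false := by
  unfold relax1 at h ⊢
  split_ifs at h ⊢ <;> simp_all

theorem relaxRoad_flag (v : List Int) (c : Bool) (r : List Int)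
    (h : (relaxRoad v c r).2 = false) : (relaxRoad v c r).1 = v ∧ c = false := by
  have h1 := relax1_flag (relax1 v c (PySem.List.pyGetD r 0 0) (PySem.List.pyGetD r 1 0)).1
    (relax1 v c (PySem.List.pyGetD r 0 0) (PySem.List.pyGetD r 1 0)).2
    (PySem.List.pyGetD r 1 0) (PySem.List.pyGetD r 0 0) h
  obtain ⟨e1, e2⟩ := h1
  obtain ⟨e3, e4⟩ := relax1_flag _ _ _ _ e2
  refine ⟨?_, e4⟩
  show (relax1 (relax1 v c (PySem.List.pyGetD r 0 0) (PySem.List.pyGetD r 1 0)).1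
      (relax1 v c (PySem.List.pyGetD r 0 0) (PySem.List.pyGetD r 1 0)).2
      (PySem.List.pyGetD r 1 0) (PySem.List.pyGetD r 0 0)).1 = v
  rw [e1, e3]

-- entries stay ≥ -1 and the length is preserved
theorem relaxN1_ge (v : List Int) (c : Bool) (ai bi : Nat) (hai : ai < v.length)
    (Hge : ∀ x ∈ v, -1 ≤ x) : ∀ x ∈ (relaxN1 v c ai bi).1, -1 ≤ x := by
  unfold relaxN1
  split_ifs with h
  · intro x hx
    rcases List.mem_or_eq_of_mem_set hx with h' | h'
    · exact Hge x h'
    · have := ge_getD v Hge ai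
      omega
  · exact Hge

-- finite cells stay finite and never increase
theorem relaxN1_mono (v : List Int) (c : Bool) (ai bi : Nat) (hai : ai < v.length)
    (Hge : ∀ x ∈ v, -1 ≤ x) (j : Nat) (cbd : Int)
    (hj : v.getD j 0 ≠ -1) (hjb : v.getD j 0 ≤ cbd) :
    (relaxN1 v c ai bi).1.getD j 0 ≠ -1 ∧ (relaxN1 v c ai bi).1.getD j 0 ≤ cbd := by
  unfold relaxN1
  split_ifs with h
  · by_cases hjb2 : j = bi
    · subst hjb2
      rcases Nat.lt_or_ge j v.length with hjlt | hjge
      · rw [getD_set_self _ _ _ _ hjlt]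
        have hge := ge_getD v Hge ai
        obtain ⟨ha1, ha2⟩ := h
        rcases ha2 with h2 | h2
        · exact absurd h2 hj
        · constructor <;> omega
      · have he : (v.set j (v.getD ai 0 + 1)).getD j 0 = v.getD j 0 := by
          rw [List.getD_eq_default _ _ (by simpa using hjge),
            List.getD_eq_default _ _ (by simpa using hjge)]
        rw [he]
        exact ⟨hj, hjb⟩
    · rw [getD_set_ne _ _ _ _ _ hjb2]
      exact ⟨hj, hjb⟩
  · exact ⟨hj, hjb⟩

-- relaxation establishes the target bound from a good source
theorem relaxN1_est (v : List Int) (c : Bool) (ai bi : Nat) (hbi : bi < v.length)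
    (Hge : ∀ x ∈ v, -1 ≤ x) (kk : Int)
    (hu : v.getD ai 0 ≠ -1) (hub : v.getD ai 0 ≤ kk) :
    (relaxN1 v c ai bi).1.getD bi 0 ≠ -1 ∧ (relaxN1 v c ai bi).1.getD bi 0 ≤ kk + 1 := by
  have hge := ge_getD v Hge ai
  unfold relaxN1
  split_ifs with h
  · rw [getD_set_self _ _ _ _ hbi]
    constructor <;> omega
  · have hb1 : v.getD bi 0 ≠ -1 := by
      intro hb2
      exact h ⟨hu, Or.inl hb2⟩
    have hb2 : ¬(v.getD ai 0 + 1 < v.getD bi 0) := by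
      intro hlt
      exact h ⟨hu, Or.inr hlt⟩
    exact ⟨hb1, by show v.getD bi 0 ≤ kk + 1; omega⟩

def RoadOK (L : Nat) (r : List Int) : Prop := InR L (r.getD 0 0) ∧ InR L (r.getD 1 0)

-- the triangle inequality of the BFS result along one road, in both directions
def TriW (L : Nat) (W : List Int) (r : List Int) : Prop :=
  (W.getD (widx L (r.getD 0 0)) 0 ≠ -1 → W.getD (widx L (r.getD 1 0)) 0 ≠ -1 ∧
    W.getD (widx L (r.getD 1 0)) 0 ≤ W.getD (widx L (r.getD 0 0)) 0 + 1) ∧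
  (W.getD (widx L (r.getD 1 0)) 0 ≠ -1 → W.getD (widx L (r.getD 0 0)) 0 ≠ -1 ∧
    W.getD (widx L (r.getD 0 0)) 0 ≤ W.getD (widx L (r.getD 1 0)) 0 + 1)

-- a relaxation step keeps the lower invariant "W ≤ every finite cell"
theorem relaxN1_inv (v : List Int) (c : Bool) (ai bi : Nat) (hbi : bi < v.length)
    (W : List Int)
    (T : W.getD ai 0 ≠ -1 → W.getD bi 0 ≠ -1 ∧ W.getD bi 0 ≤ W.getD ai 0 + 1)
    (Inv : ∀ j : Nat, v.getD j 0 ≠ -1 → W.getD j 0 ≠ -1 ∧ W.getD j 0 ≤ v.getD j 0) :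
    ∀ j : Nat, (relaxN1 v c ai bi).1.getD j 0 ≠ -1 →
      W.getD j 0 ≠ -1 ∧ W.getD j 0 ≤ (relaxN1 v c ai bi).1.getD j 0 := by
  unfold relaxN1
  split_ifs with h
  · intro j hj
    by_cases hje : j = bi
    · subst hje
      rw [getD_set_self _ _ _ _ hbi] at hj ⊢
      obtain ⟨hI1, hI2⟩ := Inv ai h.1
      obtain ⟨hT1, hT2⟩ := T hI1
      exact ⟨hT1, by omega⟩
    · rw [getD_set_ne _ _ _ _ _ hje] at hj ⊢
      exact Inv j hj
  · exact Inv

theorem relaxRoad_good (v : List Int) (c : Bool) (r : List Int)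
    (hok : RoadOK v.length r) (Hge : ∀ x ∈ v, -1 ≤ x) :
    (relaxRoad v c r).1.length = v.length ∧ (∀ x ∈ (relaxRoad v c r).1, -1 ≤ x) ∧
    (∀ (j : Nat) (cbd : Int), v.getD j 0 ≠ -1 → v.getD j 0 ≤ cbd →
      (relaxRoad v c r).1.getD j 0 ≠ -1 ∧ (relaxRoad v c r).1.getD j 0 ≤ cbd) := by
  obtain ⟨ha, hb⟩ := hok
  rw [relaxRoad_eq v c r ha hb]
  have hailt : widx v.length (r.getD 0 0) < v.length := widx_lt _ _ ha
  have hbilt : widx v.length (r.getD 1 0) < v.length := widx_lt _ _ hb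
  set ai := widx v.length (r.getD 0 0)
  set bi := widx v.length (r.getD 1 0)
  set M := relaxN1 v c ai bi with hM
  have hMlen : M.1.length = v.length := length_relaxN1 _ _ _ _
  have hMge : ∀ x ∈ M.1, -1 ≤ x := relaxN1_ge v c ai bi hailt Hge
  refine ⟨by rw [length_relaxN1, hMlen],
    relaxN1_ge M.1 M.2 bi ai (by rw [hMlen]; exact hbilt) hMge, ?_⟩
  intro j cbd hj hjb
  obtain ⟨h1, h2⟩ := relaxN1_mono v c ai bi hailt Hge j cbd hj hjb
  exact relaxN1_mono M.1 M.2 bi ai (by rw [hMlen]; exact hbilt) hMge j cbd h1 h2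

theorem relaxRoad_inv (v : List Int) (c : Bool) (r : List Int)
    (hok : RoadOK v.length r) (Hge : ∀ x ∈ v, -1 ≤ x) (W : List Int)
    (T : TriW v.length W r)
    (Inv : ∀ j : Nat, v.getD j 0 ≠ -1 → W.getD j 0 ≠ -1 ∧ W.getD j 0 ≤ v.getD j 0) :
    ∀ j : Nat, (relaxRoad v c r).1.getD j 0 ≠ -1 →
      W.getD j 0 ≠ -1 ∧ W.getD j 0 ≤ (relaxRoad v c r).1.getD j 0 := by
  obtain ⟨ha, hb⟩ := hok
  obtain ⟨T1, T2⟩ := T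
  rw [relaxRoad_eq v c r ha hb]
  have hailt : widx v.length (r.getD 0 0) < v.length := widx_lt _ _ ha
  have hbilt : widx v.length (r.getD 1 0) < v.length := widx_lt _ _ hb
  set ai := widx v.length (r.getD 0 0)
  set bi := widx v.length (r.getD 1 0)
  set M := relaxN1 v c ai bi with hM
  have hMlen : M.1.length = v.length := length_relaxN1 _ _ _ _
  have Inv1 := relaxN1_inv v c ai bi hbilt W T1 Inv
  exact relaxN1_inv M.1 M.2 bi ai (by rw [hMlen]; exact hailt) W T2 Inv1

theorem relaxRoad_est (v : List Int) (c : Bool) (r : List Int)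
    (hok : RoadOK v.length r) (Hge : ∀ x ∈ v, -1 ≤ x) (u j : Nat) (kk : Int)
    (hdir : (widx v.length (r.getD 0 0) = u ∧ widx v.length (r.getD 1 0) = j) ∨
            (widx v.length (r.getD 1 0) = u ∧ widx v.length (r.getD 0 0) = j))
    (hu1 : v.getD u 0 ≠ -1) (hu2 : v.getD u 0 ≤ kk) :
    (relaxRoad v c r).1.getD j 0 ≠ -1 ∧ (relaxRoad v c r).1.getD j 0 ≤ kk + 1 := by
  obtain ⟨ha, hb⟩ := hok
  rw [relaxRoad_eq v c r ha hb]
  have hailt : widx v.length (r.getD 0 0) < v.length := widx_lt _ _ ha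
  have hbilt : widx v.length (r.getD 1 0) < v.length := widx_lt _ _ hb
  set ai := widx v.length (r.getD 0 0)
  set bi := widx v.length (r.getD 1 0)
  set M := relaxN1 v c ai bi with hM
  have hMlen : M.1.length = v.length := length_relaxN1 _ _ _ _
  have hMge : ∀ x ∈ M.1, -1 ≤ x := relaxN1_ge v c ai bi hailt Hge
  rcases hdir with ⟨hda, hdb⟩ | ⟨hda, hdb⟩
  · subst hda; subst hdb
    obtain ⟨h1, h2⟩ := relaxN1_est v c ai bi hbilt Hge kk hu1 hu2
    exact relaxN1_mono M.1 M.2 bi ai (by rw [hMlen]; exact hbilt) hMge bi (kk + 1) h1 h2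
  · subst hda; subst hdb
    obtain ⟨h1, h2⟩ := relaxN1_mono v c ai bi hailt Hge bi kk hu1 hu2
    exact relaxN1_est M.1 M.2 bi ai (by rw [hMlen]; exact hailt) hMge kk h1 h2

theorem fold_relax_good : ∀ (rs : List (List Int)) (L : Nat) (v : List Int) (c : Bool),
    v.length = L → (∀ r ∈ rs, RoadOK L r) → (∀ x ∈ v, -1 ≤ x) →
    (rs.foldl (fun s road => relaxRoad s.1 s.2 road) (v, c)).1.length = L ∧
    (∀ x ∈ (rs.foldl (fun s road => relaxRoad s.1 s.2 road) (v, c)).1, -1 ≤ x) ∧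
    (∀ (j : Nat) (cbd : Int), v.getD j 0 ≠ -1 → v.getD j 0 ≤ cbd →
      (rs.foldl (fun s road => relaxRoad s.1 s.2 road) (v, c)).1.getD j 0 ≠ -1 ∧
      (rs.foldl (fun s road => relaxRoad s.1 s.2 road) (v, c)).1.getD j 0 ≤ cbd) := by
  intro rs
  induction rs with
  | nil => intro L v c hlen hok Hge; exact ⟨hlen, Hge, fun _ _ h1 h2 => ⟨h1, h2⟩⟩
  | cons r rs ih =>
    intro L v c hlen hok Hge
    rw [List.foldl_cons]
    have hokr : RoadOK v.length r := by rw [hlen]; exact hok r (by simp)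
    obtain ⟨g1, g2, g3⟩ := relaxRoad_good v c r hokr Hge
    obtain ⟨i1, i2, i3⟩ := ih L (relaxRoad v c r).1 (relaxRoad v c r).2
      (by rw [g1, hlen]) (fun r' h' => hok r' (by simp [h'])) g2
    simp only [Prod.mk.eta] at i1 i2 i3
    exact ⟨i1, i2, fun j cbd h1 h2 =>
      i3 j cbd (g3 j cbd h1 h2).1 (g3 j cbd h1 h2).2⟩

theorem fold_relax_inv : ∀ (rs : List (List Int)) (L : Nat) (v : List Int) (c : Bool),
    v.length = L → (∀ r ∈ rs, RoadOK L r) → (∀ x ∈ v, -1 ≤ x) →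
    ∀ (W : List Int), (∀ r ∈ rs, TriW L W r) →
    (∀ j : Nat, v.getD j 0 ≠ -1 → W.getD j 0 ≠ -1 ∧ W.getD j 0 ≤ v.getD j 0) →
    ∀ j : Nat, (rs.foldl (fun s road => relaxRoad s.1 s.2 road) (v, c)).1.getD j 0 ≠ -1 →
      W.getD j 0 ≠ -1 ∧
      W.getD j 0 ≤ (rs.foldl (fun s road => relaxRoad s.1 s.2 road) (v, c)).1.getD j 0 := by
  intro rs
  induction rs with
  | nil => intro L v c _ _ _ W _ hInv; exact hInv
  | cons r rs ih =>
    intro L v c hlen hok Hge W htri hInv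
    rw [List.foldl_cons]
    have hokr : RoadOK v.length r := by rw [hlen]; exact hok r (by simp)
    have htriw : TriW v.length W r := by rw [hlen]; exact htri r (by simp)
    obtain ⟨g1, g2, _⟩ := relaxRoad_good v c r hokr Hge
    have hInv1 := relaxRoad_inv v c r hokr Hge W htriw hInv
    have := ih L (relaxRoad v c r).1 (relaxRoad v c r).2
      (by rw [g1, hlen]) (fun r' h' => hok r' (by simp [h'])) g2 W
      (fun r' h' => htri r' (by simp [h'])) hInv1
    simp only [Prod.mk.eta] at this
    exact this

theorem fold_relax_flag : ∀ (rs : List (List Int)) (v : List Int) (c : Bool),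
    (rs.foldl (fun s road => relaxRoad s.1 s.2 road) (v, c)).2 = false →
    (rs.foldl (fun s road => relaxRoad s.1 s.2 road) (v, c)).1 = v ∧ c = false := by
  intro rs
  induction rs with
  | nil => intro v c h; exact ⟨rfl, h⟩
  | cons r rs ih =>
    intro v c h
    rw [List.foldl_cons] at h ⊢
    have h' := ih (relaxRoad v c r).1 (relaxRoad v c r).2 (by simpa [Prod.mk.eta] using h)
    simp only [Prod.mk.eta] at h'
    obtain ⟨h1, h2⟩ := h'
    obtain ⟨h3, h4⟩ := relaxRoad_flag v c r h2
    exact ⟨by rw [h1, h3], h4⟩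

theorem fold_relax_est (rs : List (List Int)) (L : Nat) (v : List Int) (c : Bool) (r : List Int)
    (hr : r ∈ rs) (hok : ∀ r' ∈ rs, RoadOK L r') (hlen : v.length = L)
    (Hge : ∀ x ∈ v, -1 ≤ x) (u j : Nat) (kk : Int)
    (hdir : (widx L (r.getD 0 0) = u ∧ widx L (r.getD 1 0) = j) ∨
            (widx L (r.getD 1 0) = u ∧ widx L (r.getD 0 0) = j))
    (hu1 : v.getD u 0 ≠ -1) (hu2 : v.getD u 0 ≤ kk) :
    (rs.foldl (fun s road => relaxRoad s.1 s.2 road) (v, c)).1.getD j 0 ≠ -1 ∧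
    (rs.foldl (fun s road => relaxRoad s.1 s.2 road) (v, c)).1.getD j 0 ≤ kk + 1 := by
  obtain ⟨s, t, rfl⟩ := List.append_of_mem hr
  rw [List.foldl_append, List.foldl_cons]
  obtain ⟨m1, m2, m3⟩ := fold_relax_good s L v c hlen
    (fun r' h' => hok r' (by simp [h'])) Hge
  set M := s.foldl (fun s road => relaxRoad s.1 s.2 road) (v, c) with hM
  obtain ⟨e1, e2⟩ := m3 u kk hu1 hu2
  have hokr : RoadOK M.1.length r := by rw [m1]; exact hok r (by simp)
  have hdir' : (widx M.1.length (r.getD 0 0) = u ∧ widx M.1.length (r.getD 1 0) = j) ∨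
      (widx M.1.length (r.getD 1 0) = u ∧ widx M.1.length (r.getD 0 0) = j) := by
    rw [m1]; exact hdir
  obtain ⟨f1, f2⟩ := relaxRoad_est M.1 M.2 r hokr m2 u j kk hdir' e1 e2
  obtain ⟨rg1, rg2, _⟩ := relaxRoad_good M.1 M.2 r hokr m2
  obtain ⟨_, _, G3⟩ := fold_relax_good t L (relaxRoad M.1 M.2 r).1 (relaxRoad M.1 M.2 r).2
    (by rw [rg1, m1]) (fun r' h' => hok r' (by simp [h'])) rg2
  simp only [Prod.mk.eta] at G3
  exact G3 j (kk + 1) f1 f2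

-- the pure pass iteration (no early break)
def passIter (roads : List (List Int)) : Nat → List Int → List Int
  | 0, v => v
  | f+1, v => passIter roads f (bfPass roads v).1

theorem passIter_fix (roads : List (List Int)) (v : List Int) (h : (bfPass roads v).1 = v) :
    ∀ f : Nat, passIter roads f v = v := by
  intro f
  induction f with
  | zero => rfl
  | succ f ih =>
    show passIter roads f (bfPass roads v).1 = v
    rw [h]
    exact ih

-- the break is sound: breaking early returns the same array as running all passes
theorem bfLoop_eq_passIter (roads : List (List Int)) : ∀ (f : Nat) (v : List Int),
    bfLoop roads f v = passIter roads f v := by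
  intro f
  induction f with
  | zero => intro v; rfl
  | succ f ih =>
    intro v
    show (if (bfPass roads v).2 then bfLoop roads f (bfPass roads v).1 else (bfPass roads v).1) =
      passIter roads f (bfPass roads v).1
    by_cases hc : (bfPass roads v).2 = true
    · rw [if_pos hc]
      exact ih _
    · have hc' : (bfPass roads v).2 = false := by simpa using hc
      rw [if_neg (by simp [hc'])]
      have h1 : (bfPass roads v).1 = v := (fold_relax_flag roads v false hc').1
      rw [h1]
      exact (passIter_fix roads v h1 f).symm

theorem passIter_succ_right (roads : List (List Int)) : ∀ (f : Nat) (v : List Int),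
    passIter roads (f+1) v = (bfPass roads (passIter roads f v)).1 := by
  intro f
  induction f with
  | zero => intro v; rfl
  | succ f ih =>
    intro v
    show passIter roads (f+1) (bfPass roads v).1 = _
    rw [ih ((bfPass roads v).1)]
    rfl

theorem passIter_good (roads : List (List Int)) (L : Nat) (hok : ∀ r ∈ roads, RoadOK L r) :
    ∀ (f : Nat) (v : List Int), v.length = L → (∀ x ∈ v, -1 ≤ x) →
    (passIter roads f v).length = L ∧ (∀ x ∈ passIter roads f v, -1 ≤ x) := by
  intro f
  induction f with
  | zero => intro v h1 h2; exact ⟨h1, h2⟩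
  | succ f ih =>
    intro v h1 h2
    obtain ⟨g1, g2, _⟩ := fold_relax_good roads L v false h1 hok h2
    exact ih _ g1 g2

theorem passIter_inv (roads : List (List Int)) (L : Nat) (W : List Int)
    (hok : ∀ r ∈ roads, RoadOK L r) (htri : ∀ r ∈ roads, TriW L W r) :
    ∀ (f : Nat) (v : List Int), v.length = L → (∀ x ∈ v, -1 ≤ x) →
    (∀ j : Nat, v.getD j 0 ≠ -1 → W.getD j 0 ≠ -1 ∧ W.getD j 0 ≤ v.getD j 0) →
    ∀ j : Nat, (passIter roads f v).getD j 0 ≠ -1 →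
      W.getD j 0 ≠ -1 ∧ W.getD j 0 ≤ (passIter roads f v).getD j 0 := by
  intro f
  induction f with
  | zero => intro v _ _ hInv; exact hInv
  | succ f ih =>
    intro v h1 h2 hInv
    obtain ⟨g1, g2, _⟩ := fold_relax_good roads L v false h1 hok h2
    exact ih _ g1 g2 (fold_relax_inv roads L v false h1 hok h2 W htri hInv)

theorem passIter_upper (roads : List (List Int)) (L dIdx : Nat) (W v0 : List Int)
    (hok : ∀ r ∈ roads, RoadOK L r)
    (hv0len : v0.length = L) (hv0ge : ∀ x ∈ v0, -1 ≤ x) (hv0d : v0.getD dIdx 0 = 0)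
    (hW0 : ∀ j : Nat, j < L → W.getD j 0 = 0 → j = dIdx)
    (hWge : ∀ j : Nat, -1 ≤ W.getD j 0)
    (hwitR : ∀ j : Nat, j < L → 1 ≤ W.getD j 0 → ∃ u : Nat, u < L ∧
      W.getD u 0 = W.getD j 0 - 1 ∧
      ∃ r ∈ roads, (widx L (r.getD 0 0) = u ∧ widx L (r.getD 1 0) = j) ∨
        (widx L (r.getD 1 0) = u ∧ widx L (r.getD 0 0) = j)) :
    ∀ (k : Nat) (j : Nat), j < L → W.getD j 0 ≠ -1 → W.getD j 0 ≤ (k : Int) →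
      (passIter roads k v0).getD j 0 ≠ -1 ∧ (passIter roads k v0).getD j 0 ≤ W.getD j 0 := by
  intro k
  induction k with
  | zero =>
    intro j hj hne hle
    have h1 := hWge j
    have h0 : W.getD j 0 = 0 := by push_cast at hle; omega
    have hjd := hW0 j hj h0
    subst hjd
    refine ⟨?_, ?_⟩
    · show v0.getD j 0 ≠ -1
      rw [hv0d]; omega
    · show v0.getD j 0 ≤ _
      rw [hv0d, h0]
  | succ k ih =>
    intro j hj hne hle
    obtain ⟨gl, gge⟩ := passIter_good roads L hok k v0 hv0len hv0ge
    rw [passIter_succ_right]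
    by_cases hcase : W.getD j 0 ≤ (k : Int)
    · obtain ⟨h1, h2⟩ := ih j hj hne hcase
      exact (fold_relax_good roads L (passIter roads k v0) false gl hok gge).2.2 j _ h1 h2
    · have hWj : W.getD j 0 = (k : Int) + 1 := by push_cast at hle ⊢; omega
      obtain ⟨u, hu, hWu, r, hr, hdir⟩ := hwitR j hj (by rw [hWj]; omega)
      have hWune : W.getD u 0 ≠ -1 := by rw [hWu, hWj]; omega
      obtain ⟨hu1, hu2⟩ := ih u hu hWune (by rw [hWu, hWj]; omega)
      have hu2' : (passIter roads k v0).getD u 0 ≤ (k : Int) := by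
        rw [hWu, hWj] at hu2; omega
      have hest := fold_relax_est roads L (passIter roads k v0) false r hr hok gl gge
        u j (k : Int) hdir hu1 hu2' 
      rw [hWj]
      exact hest

-- ===== VERDICT (by name: the statement is the Claim_ definition above) =====
theorem solution_spec : Claim_equal_solution := by
  intro n roads sources destination _ hpre
  obtain ⟨hn, hd0, hdn, hroads, _⟩ := hpre
  show solution n roads sources destination = solution_alt n roads sources destination
  simp only [solution, solution_alt]
  set N := (n+1).toNat with hN
  have hroadsIn : ∀ r ∈ roads, InR N (r.getD 0 0) ∧ InR N (r.getD 1 0) := by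
    intro r hr
    obtain ⟨_, h1, h2, h3, h4⟩ := hroads r hr
    exact ⟨⟨by omega, by omega⟩, ⟨by omega, by omega⟩⟩
  have roadsOK : ∀ r ∈ roads, RoadOK N r := hroadsIn
  set g := buildGraph n roads with hg
  have hglen : g.length = N := buildGraph_length n roads
  have hgrange : ∀ l ∈ g, ∀ i ∈ l, InR N i := buildGraph_range n roads hn hroadsIn
  have hdin : InR N destination := ⟨by omega, by omega⟩
  set dIdx := widx N destination with hdIdx
  have hdlt : dIdx < N := widx_lt _ _ hdin
  have hdin' : InR (List.replicate N (-1 : Int)).length destination := by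
    rw [List.length_replicate]; exact hdin
  rw [pySetD_widx _ destination 0 hdin', List.length_replicate]
  set v0 := (List.replicate N (-1 : Int)).set dIdx 0 with hv0
  have hlen0 : v0.length = N := by simp [hv0]
  have hv0d : v0.getD dIdx 0 = 0 := getD_set_self _ _ _ _ (by simpa using hdlt)
  have hv0other : ∀ j : Nat, j ≠ dIdx → v0.getD j 0 = (List.replicate N (-1 : Int)).getD j 0 :=
    fun j hj => getD_set_ne _ _ _ _ _ hj
  have hrepget : ∀ j : Nat, j < N → (List.replicate N (-1 : Int)).getD j 0 = -1 := by
    intro j hj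
    rw [List.getD_eq_getElem _ _ (by simpa using hj)]
    simp
  have hv0ge : ∀ a ∈ v0, -1 ≤ a := by
    intro a ha
    rcases List.mem_or_eq_of_mem_set ha with h | h
    · rw [List.eq_of_mem_replicate h]
    · omega
  have hmiss : miss v0 + 1 = N := by
    have := count_set_neg_one (List.replicate N (-1 : Int)) dIdx 0 (by simpa using hdlt)
      (hrepget dIdx hdlt) (by norm_num)
    simpa [miss] using this
  have hfront0 : ∀ x ∈ [destination], InR v0.length x ∧ v0.getD (widx v0.length x) 0 = 0 := by
    intro x hx
    simp only [List.mem_singleton] at hx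
    subst hx
    rw [hlen0]
    exact ⟨hdin, hv0d⟩
  have hgrange' : ∀ l ∈ g, ∀ i ∈ l, InR v0.length i := by rw [hlen0]; exact hgrange
  have hveq : bfsA g N v0 [destination] = bfsB g N 0 v0 [destination] :=
    bfs_equiv N g 0 v0 [destination] (by simp; omega) hv0ge hfront0 hgrange' (by omega)
  rw [hveq]
  set W := bfsB g N 0 v0 [destination] with hW
  have hpost : Wpost g dIdx v0.length (0 + (N : Int)) W := by
    refine bfsB_post dIdx N g N 0 v0 [destination] (by simp; omega) (le_refl N) (le_refl 0)
      (by rw [hlen0]; exact hglen) hgrange' (by rw [hlen0]; exact hdlt) hv0d hv0ge ?_ ?_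
      hfront0 ?_ ?_ ?_
    · intro j hj
      by_cases hje : j = dIdx
      · subst hje; rw [hv0d]
      · rw [hv0other j hje, hrepget j (by rw [hlen0] at hj; exact hj)]
        omega
    · intro j hj h0
      by_contra hje
      rw [hv0other j hje, hrepget j (by rw [hlen0] at hj; exact hj)] at h0
      norm_num at h0
    · intro j hj h0
      have hje : j = dIdx := by
        by_contra hne
        rw [hv0other j hne, hrepget j (by rw [hlen0] at hj; exact hj)] at h0
        norm_num at h0
      exact ⟨destination, by simp, by rw [hlen0, hje]⟩
    · intro u hu i hi hne hlt
      exfalso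
      by_cases hje : u = dIdx
      · subst hje; rw [hv0d] at hlt; omega
      · rw [hv0other u hje, hrepget u (by rw [hlen0] at hu; exact hu)] at hne
        exact hne rfl
    · intro j hj h1
      exfalso
      by_cases hje : j = dIdx
      · subst hje; rw [hv0d] at h1; omega
      · rw [hv0other j hje, hrepget j (by rw [hlen0] at hj; exact hj)] at h1
        omega
  rw [hlen0] at hpost
  unfold Wpost at hpost
  obtain ⟨c1, c2, c3, c4, c5, c6, c7⟩ := hpost
  have hWge : ∀ j : Nat, -1 ≤ W.getD j 0 := ge_getD W c2
  have hTriW : ∀ r ∈ roads, TriW N W r := by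
    intro r hr
    obtain ⟨hra, hrb⟩ := hroadsIn r hr
    constructor
    · intro hne
      have hmem : (r.getD 1 0) ∈ g.getD (widx N (r.getD 0 0)) [] := by
        rw [hg]
        exact (buildGraph_getD_mem n roads hn hroadsIn _ _).mpr ⟨r, hr, Or.inl ⟨rfl, rfl⟩⟩
      exact c6 (widx N (r.getD 0 0)) (widx_lt _ _ hra) _ hmem hne
    · intro hne
      have hmem : (r.getD 0 0) ∈ g.getD (widx N (r.getD 1 0)) [] := by
        rw [hg]
        exact (buildGraph_getD_mem n roads hn hroadsIn _ _).mpr ⟨r, hr, Or.inr ⟨rfl, rfl⟩⟩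
      exact c6 (widx N (r.getD 1 0)) (widx_lt _ _ hrb) _ hmem hne
  have hwitR : ∀ j : Nat, j < N → 1 ≤ W.getD j 0 → ∃ u : Nat, u < N ∧
      W.getD u 0 = W.getD j 0 - 1 ∧
      ∃ r ∈ roads, (widx N (r.getD 0 0) = u ∧ widx N (r.getD 1 0) = j) ∨
        (widx N (r.getD 1 0) = u ∧ widx N (r.getD 0 0) = j) := by
    intro j hj h1
    obtain ⟨u, hu, ⟨i, hi, hwidx⟩, hval⟩ := c7 j hj h1
    obtain ⟨r, hr, hcase⟩ := (buildGraph_getD_mem n roads hn hroadsIn u i).mp (by rw [← hg]; exact hi)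
    rcases hcase with ⟨he1, he2⟩ | ⟨he1, he2⟩
    · exact ⟨u, hu, hval, r, hr, Or.inl ⟨he1, by rw [← he2]; exact hwidx⟩⟩
    · exact ⟨u, hu, hval, r, hr, Or.inr ⟨he1, by rw [← he2]; exact hwidx⟩⟩
  have hInv0 : ∀ j : Nat, v0.getD j 0 ≠ -1 → W.getD j 0 ≠ -1 ∧ W.getD j 0 ≤ v0.getD j 0 := by
    intro j hne
    rcases Nat.lt_or_ge j N with hj | hj
    · by_cases hje : j = dIdx
      · subst hje
        rw [hv0d, c4]
        exact ⟨by norm_num, le_refl 0⟩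
      · rw [hv0other j hje, hrepget j hj] at hne
        exact absurd rfl hne
    · have hWj : W.getD j 0 = 0 := List.getD_eq_default _ _ (by rw [c1]; exact hj)
      have hv0j : v0.getD j 0 = 0 := List.getD_eq_default _ _ (by rw [hlen0]; exact hj)
      rw [hWj, hv0j]
      exact ⟨by norm_num, le_refl 0⟩
  obtain ⟨hDlen, _⟩ := passIter_good roads N roadsOK N v0 hlen0 hv0ge
  have hupper := passIter_upper roads N dIdx W v0 roadsOK hlen0 hv0ge hv0d c5 hWge hwitR N
  have hinvD := passIter_inv roads N W roadsOK hTriW N v0 hlen0 hv0ge hInv0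
  have hWD : passIter roads N v0 = W := by
    apply List.ext_getElem (by rw [hDlen, c1])
    intro j hj1 hj2
    have hjN : j < N := by rw [hDlen] at hj1; exact hj1
    have e1 : (passIter roads N v0)[j] = (passIter roads N v0).getD j 0 :=
      (List.getD_eq_getElem _ _ hj1).symm
    have e2 : W[j] = W.getD j 0 := (List.getD_eq_getElem _ _ hj2).symm
    rw [e1, e2]
    by_cases hWj : W.getD j 0 = -1
    · by_cases hDj : (passIter roads N v0).getD j 0 = -1
      · rw [hDj, hWj]
      · exact absurd hWj (hinvD j hDj).1
    · have hWle : W.getD j 0 ≤ (N : Int) := by have := c3 j hjN; omega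
      obtain ⟨hu1, hu2⟩ := hupper j hjN hWj hWle
      obtain ⟨_, hl2⟩ := hinvD j hu1
      omega
  rw [bfLoop_eq_passIter roads N v0, hWD]
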